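-- pv_equiv track=rewrite | github.com/customsshin-alt/green-db | customs_pdf_extractor.py | merge_description_rows
-- ===== SOURCE A (Python) =====
-- def merge_description_rows(table_rows, desc_col_index):
--     """
--     테이블에서 'Description' 등 한 항목이 여러 행으로 나뉜 경우,
--     연속된 빈 셀이 있는 행을 이전 행의 Description과 합쳐서 하나의 행으로 만듭니다.
--     desc_col_index: Description 컬럼의 인덱스 (0-based).
--     (merge_continuation_rows로 전체 컬럼 병합 시 이 함수는 보조로만 사용 가능)
--     """
--     if not table_rows or desc_col_index < 0:
--         return table_rows
--
--     merged = []
--     i = 0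
--     while i < len(table_rows):
--         row = list(table_rows[i])
--         if len(row) <= desc_col_index:
--             merged.append(row)
--             i += 1
--             continue
--
--         desc_cell = str(row[desc_col_index]).strip() if row[desc_col_index] else ""
--         j = i + 1
--         while j < len(table_rows):
--             next_row = list(table_rows[j])
--             if len(next_row) <= desc_col_index:
--                 break
--             next_desc = (
--                 str(next_row[desc_col_index]).strip() if next_row[desc_col_index] else ""
--             )
--             front_empty = all(
--                 not str(c).strip() for c in next_row[:desc_col_index]
--             )
--             if front_empty and next_desc:
--                 desc_cell = desc_cell + "\n" + next_desc
--                 j += 1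
--             else:
--                 break
--
--         row[desc_col_index] = desc_cell
--         merged.append(row)
--         i = j
--
--     return merged
-- ===== SOURCE B (Python) =====
-- def merge_description_rows(table_rows, desc_col_index):
--     if not table_rows or desc_col_index < 0:
--         return table_rows
--     merged = []
--     base = None  # last emitted long row (a fresh copy), or None
--     for r in table_rows:
--         row = list(r)
--         if len(row) <= desc_col_index:
--             merged.append(row)
--             base = None
--             continue
--         desc = str(row[desc_col_index]).strip() if row[desc_col_index] else ""
--         if (
--             base is not None
--             and desc
--             and all(not str(c).strip() for c in row[:desc_col_index])
--         ):
--             base[desc_col_index] = base[desc_col_index] + "\n" + desc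
--         else:
--             row[desc_col_index] = desc
--             merged.append(row)
--             base = row
--     return merged
-- ===== Notes on version B (the rewrite author's own statement) =====
-- stated objective: simpler
-- what changed: Replaced A's nested while-loops with explicit index bookkeeping (inner loop re-scanning forward for continuation rows) by a single flat for-loop that keeps a reference to the last emitted base row and appends continuation text into it directly.
import Mathlib
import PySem

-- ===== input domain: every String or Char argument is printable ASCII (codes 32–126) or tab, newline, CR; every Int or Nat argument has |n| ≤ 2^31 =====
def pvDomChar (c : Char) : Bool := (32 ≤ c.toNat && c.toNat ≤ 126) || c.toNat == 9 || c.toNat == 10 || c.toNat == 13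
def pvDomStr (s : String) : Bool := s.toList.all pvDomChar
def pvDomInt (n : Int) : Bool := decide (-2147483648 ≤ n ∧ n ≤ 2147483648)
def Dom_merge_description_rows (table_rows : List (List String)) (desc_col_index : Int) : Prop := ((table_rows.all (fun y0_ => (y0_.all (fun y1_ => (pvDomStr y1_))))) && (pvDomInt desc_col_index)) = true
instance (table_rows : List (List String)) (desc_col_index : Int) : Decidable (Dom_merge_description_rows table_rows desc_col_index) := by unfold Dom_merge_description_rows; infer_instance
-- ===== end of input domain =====

-- B replaces A's nested while-loops (inner forward re-scan with index bookkeeping) by one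
-- flat fold that keeps the last emitted base row at the head of a reversed accumulator;
-- objective: simpler. Equivalence of the RETURN value is proved (neither side mutates input).

-- ===== PORT A =====
-- `str(row[d]).strip() if row[d] else ""` (cells are strings, so str(c) = c)
def pvCellDesc (row : List String) (d : Nat) : String :=
  let c := row.getD d ""
  if c ≠ "" then PySem.Str.strip c else ""

-- `all(not str(c).strip() for c in next_row[:desc_col_index])`
def pvFrontEmpty (row : List String) (d : Nat) : Bool :=
  (row.take d).all (fun c => PySem.Str.strip c = "")

-- A's inner while loop: absorbs continuation rows, returns (desc_cell, remaining rows from j)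
def mergeA_inner (d : Nat) (desc_cell : String) (l : List (List String)) :
    String × List (List String) :=
  match l with
  | [] => (desc_cell, [])
  | next :: rest =>
    if next.length ≤ d then (desc_cell, next :: rest)
    else
      let next_desc := pvCellDesc next d
      if pvFrontEmpty next d ∧ next_desc ≠ "" then
        mergeA_inner d (desc_cell ++ "\n" ++ next_desc) rest
      else (desc_cell, next :: rest)

theorem mergeA_inner_len (d : Nat) (s : String) (l : List (List String)) :
    (mergeA_inner d s l).2.length ≤ l.length := by
  induction l generalizing s with
  | nil => simp [mergeA_inner]
  | cons r rest ih =>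
    simp only [mergeA_inner]
    split
    · simp
    · split
      · exact le_trans (ih _) (by simp)
      · simp

-- A's outer while loop over the remaining suffix of table_rows
def mergeA_outer (d : Nat) (l : List (List String)) : List (List String) :=
  match l with
  | [] => []
  | row :: rest =>
    if row.length ≤ d then row :: mergeA_outer d rest
    else
      let p := mergeA_inner d (pvCellDesc row d) rest
      (row.set d p.1) :: mergeA_outer d p.2
  termination_by l.length
  decreasing_by
  · simp
  · exact Nat.lt_succ_of_le (mergeA_inner_len _ _ _)

def merge_description_rows (table_rows : List (List String)) (desc_col_index : Int) : List (List String) :=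
  if table_rows = [] ∨ desc_col_index < 0 then table_rows
  else mergeA_outer desc_col_index.toNat table_rows

-- ===== PORT B =====
-- one step of B's flat loop; state = (merged list in reverse, "base is merged's head?")
def mergeB_step (d : Nat) (st : List (List String) × Bool) (r : List String) :
    List (List String) × Bool :=
  if r.length ≤ d then (r :: st.1, false)
  else
    let desc := pvCellDesc r d
    if st.2 ∧ desc ≠ "" ∧ pvFrontEmpty r d then
      match st.1 with
      | b :: t => ((b.set d (b.getD d "" ++ "\n" ++ desc)) :: t, true)
      | [] => st  -- unreachable: when st.2 the accumulator is nonempty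
    else ((r.set d desc) :: st.1, true)

def merge_description_rows_alt (table_rows : List (List String)) (desc_col_index : Int) : List (List String) :=
  if table_rows = [] ∨ desc_col_index < 0 then table_rows
  else ((table_rows.foldl (mergeB_step desc_col_index.toNat) ([], false)).1).reverse

-- ===== PRECONDITION & SPEC =====
def Spec_merge_description_rows (table_rows : List (List String)) (desc_col_index : Int) (out : List (List String)) : Prop := out = merge_description_rows_alt table_rows desc_col_index
instance (table_rows : List (List String)) (desc_col_index : Int) (out : List (List String)) : Decidable (Spec_merge_description_rows table_rows desc_col_index out) := by unfold Spec_merge_description_rows; infer_instance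

-- ===== CLAIM (what is proved, stated in full; the proofs are below) =====
def Claim_equal_merge_description_rows : Prop := ∀ (table_rows : List (List String)) (desc_col_index : Int), Dom_merge_description_rows table_rows desc_col_index → Spec_merge_description_rows table_rows desc_col_index (merge_description_rows table_rows desc_col_index)

-- ===== LEMMAS AND PROOFS =====

theorem pv_set_getD_self {b : List String} {d : Nat} (h : d < b.length) :
    b.set d ((b[d]?).getD "") = b := by
  apply List.ext_getElem
  · simp
  · intro i h1 h2
    by_cases hi : i = d
    · subst hi
      simp [List.getElem?_eq_getElem h]
    · simp only [List.getElem_set]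
      rw [if_neg (by omega)]

-- joint invariant: from a no-base state the fold produces A's outer loop output;
-- from a with-base state (head b of the accumulator is the base) it first runs A's inner loop.
theorem mergeB_fold_spec (d : Nat) (l : List (List String)) :
    (∀ acc : List (List String),
       ((l.foldl (mergeB_step d) (acc, false)).1).reverse
         = acc.reverse ++ mergeA_outer d l) ∧
    (∀ (b : List String) (acc : List (List String)), d < b.length →
       ((l.foldl (mergeB_step d) (b :: acc, true)).1).reverse
         = acc.reverse ++
             (b.set d (mergeA_inner d (b.getD d "") l).1)
               :: mergeA_outer d (mergeA_inner d (b.getD d "") l).2) := by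
  induction l with
  | nil =>
    constructor
    · intro acc; simp [mergeA_outer]
    · intro b acc hb
      simp [mergeA_inner, mergeA_outer, List.getD, pv_set_getD_self hb]
  | cons r rest ih =>
    constructor
    · intro acc
      by_cases hshort : r.length ≤ d
      · simp only [List.foldl_cons, mergeB_step, if_pos hshort, mergeA_outer]
        rw [ih.1 (r :: acc)]
        simp
      · have hd : d < r.length := by omega
        simp only [List.foldl_cons, mergeB_step, if_neg hshort]
        rw [if_neg (by simp)]
        rw [ih.2 (r.set d (pvCellDesc r d)) acc (by simpa using hd)]
        simp only [mergeA_outer, if_neg hshort, List.getD,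
          List.getElem?_set_self hd, Option.getD_some, List.set_set]
    · intro b acc hb
      by_cases hshort : r.length ≤ d
      · simp only [List.foldl_cons, mergeB_step, if_pos hshort]
        rw [ih.1 (r :: b :: acc)]
        simp only [mergeA_inner, if_pos hshort, mergeA_outer, List.getD,
          pv_set_getD_self hb]
        simp
      · have hd : d < r.length := by omega
        simp only [List.foldl_cons, mergeB_step, if_neg hshort]
        by_cases hmerge : pvFrontEmpty r d ∧ pvCellDesc r d ≠ ""
        · rw [if_pos (show True ∧ pvCellDesc r d ≠ "" ∧ pvFrontEmpty r d = true from
            ⟨trivial, hmerge.2, hmerge.1⟩)]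
          rw [ih.2 (b.set d (b.getD d "" ++ "\n" ++ pvCellDesc r d)) acc (by simpa using hb)]
          simp only [mergeA_inner, if_neg hshort, if_pos hmerge, List.getD,
            List.getElem?_set_self hb, Option.getD_some, List.set_set]
        · rw [if_neg (fun h => hmerge ⟨h.2.2, h.2.1⟩)]
          rw [ih.2 (r.set d (pvCellDesc r d)) (b :: acc) (by simpa using hd)]
          simp only [mergeA_inner, if_neg hshort, if_neg hmerge, mergeA_outer, List.getD,
            List.getElem?_set_self hd, Option.getD_some, List.set_set,
            pv_set_getD_self hb]
          simp

-- ===== VERDICT (by name: the statement is the Claim_ definition above) =====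
theorem merge_description_rows_spec : Claim_equal_merge_description_rows := by
  intro table_rows desc_col_index _
  unfold Spec_merge_description_rows merge_description_rows merge_description_rows_alt
  split
  · rfl
  · rw [(mergeB_fold_spec desc_col_index.toNat table_rows).1 []]
    simp
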